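-- pv_equiv track=rewrite | github.com/natiaker/Machine_Learning_class | davaleba1/task3.py | sorted_students
-- ===== SOURCE A (Python) =====
-- def sorted_students(students_list):
--     grades = {"A": [], "B": [], "C": [], "D": [], "E": [], "F": []}
--
--     for name, score in students_list.items():
--         if score > 90:
--             grades["A"].append(name)
--         elif score > 80:
--             grades["B"].append(name)
--         elif score > 70:
--             grades["C"].append(name)
--         elif score > 60:
--             grades["D"].append(name)
--         elif score > 50:
--             grades["E"].append(name)
--         else:
--             grades["F"].append(name)
--
--     for grade in grades:
--         grades[grade].sort()
--
--     final_grades = {k: v for k, v in grades.items() if v}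
--
--     return final_grades
-- ===== SOURCE B (Python) =====
-- def sorted_students(students_list):
--     letters = ["A", "B", "C", "D", "E", "F"]
--     buckets = [[], [], [], [], [], []]
--     for name, score in sorted(students_list.items()):
--         buckets[min(max((90 - score) // 10 + 1, 0), 5)].append(name)
--     return {letter: bucket for letter, bucket in zip(letters, buckets) if bucket}
-- ===== Notes on version B (the rewrite author's own statement) =====
-- stated objective: alternative
-- what changed: B sorts the items once globally (lexicographically) and then buckets names in a single pass using an arithmetic clamp index into a fixed bucket array, instead of A's if-elif cascade followed by six separate per-bucket sorts; the global stable sort makes each bucket come out already name-sorted.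
import Mathlib
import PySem

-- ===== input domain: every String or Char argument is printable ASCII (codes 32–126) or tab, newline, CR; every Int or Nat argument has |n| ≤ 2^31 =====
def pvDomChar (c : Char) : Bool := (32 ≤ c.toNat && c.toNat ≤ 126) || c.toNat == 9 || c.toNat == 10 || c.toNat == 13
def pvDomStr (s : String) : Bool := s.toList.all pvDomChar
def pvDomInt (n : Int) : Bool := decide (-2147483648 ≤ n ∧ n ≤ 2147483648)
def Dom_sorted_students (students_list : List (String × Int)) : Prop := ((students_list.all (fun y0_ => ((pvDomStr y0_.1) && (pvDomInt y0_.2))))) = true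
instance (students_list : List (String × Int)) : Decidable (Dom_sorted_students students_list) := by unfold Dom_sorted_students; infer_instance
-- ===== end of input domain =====

-- B sorts the items once globally and buckets names by an arithmetic clamp index in one pass
-- (each bucket comes out already name-sorted), instead of A's if-elif cascade plus six per-bucket sorts.


-- ===== PORT A =====
-- state of A's loop: the six grade lists ("A","B","C","D","E","F") of the fixed-key dict
def pvStepA (g : List String × List String × List String × List String × List String × List String)
    (p : String × Int) :
    List String × List String × List String × List String × List String × List String :=
  if p.2 > 90 then (g.1 ++ [p.1], g.2.1, g.2.2.1, g.2.2.2.1, g.2.2.2.2.1, g.2.2.2.2.2)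
  else if p.2 > 80 then (g.1, g.2.1 ++ [p.1], g.2.2.1, g.2.2.2.1, g.2.2.2.2.1, g.2.2.2.2.2)
  else if p.2 > 70 then (g.1, g.2.1, g.2.2.1 ++ [p.1], g.2.2.2.1, g.2.2.2.2.1, g.2.2.2.2.2)
  else if p.2 > 60 then (g.1, g.2.1, g.2.2.1, g.2.2.2.1 ++ [p.1], g.2.2.2.2.1, g.2.2.2.2.2)
  else if p.2 > 50 then (g.1, g.2.1, g.2.2.1, g.2.2.2.1, g.2.2.2.2.1 ++ [p.1], g.2.2.2.2.2)
  else (g.1, g.2.1, g.2.2.1, g.2.2.2.1, g.2.2.2.2.1, g.2.2.2.2.2 ++ [p.1])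

def sorted_students (students_list : List (String × Int)) : List (String × List String) :=
  let g := students_list.foldl pvStepA ([], [], [], [], [], [])
  -- `grades[grade].sort()` per key, then `{k: v for k, v in grades.items() if v}`
  ([("A", PySem.List.sorted g.1 (fun x => x) false),
    ("B", PySem.List.sorted g.2.1 (fun x => x) false),
    ("C", PySem.List.sorted g.2.2.1 (fun x => x) false),
    ("D", PySem.List.sorted g.2.2.2.1 (fun x => x) false),
    ("E", PySem.List.sorted g.2.2.2.2.1 (fun x => x) false),
    ("F", PySem.List.sorted g.2.2.2.2.2 (fun x => x) false)]).filter (fun kv => !kv.2.isEmpty)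

-- ===== PORT B =====
-- min(max((90 - score) // 10 + 1, 0), 5) — B's bucket index (0 = "A", …, 5 = "F")
def pvIdxB (score : Int) : Nat :=
  (min (max (PySem.Int.floordiv (90 - score) 10 + 1) 0) 5).toNat

-- buckets[j].append(name)
def pvStepB (bs : List (List String)) (p : String × Int) : List (List String) :=
  bs.set (pvIdxB p.2) (bs.getD (pvIdxB p.2) [] ++ [p.1])

def sorted_students_alt (students_list : List (String × Int)) : List (String × List String) :=
  let letters : List String := ["A", "B", "C", "D", "E", "F"]
  let buckets :=
    (PySem.List.sorted2 students_list Prod.fst Prod.snd false).foldl pvStepB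
      [[], [], [], [], [], []]
  -- {letter: bucket for letter, bucket in zip(letters, buckets) if bucket}
  (letters.zip buckets).filter (fun kv => !kv.2.isEmpty)

-- ===== PRECONDITION & SPEC =====
def Spec_sorted_students (students_list : List (String × Int)) (out : List (String × List String)) : Prop := out = sorted_students_alt students_list
instance (students_list : List (String × Int)) (out : List (String × List String)) : Decidable (Spec_sorted_students students_list out) := by unfold Spec_sorted_students; infer_instance

-- ===== CLAIM (what is proved, stated in full; the proofs are below) =====
def Claim_equal_sorted_students : Prop := ∀ (students_list : List (String × Int)), Dom_sorted_students students_list → Spec_sorted_students students_list (sorted_students students_list)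

-- ===== LEMMAS AND PROOFS =====

-- names landing in bucket i
def pvPart (i : Nat) (xs : List (String × Int)) : List String :=
  (xs.filter (fun p => pvIdxB p.2 == i)).map Prod.fst

theorem pvIdxB_cases (s : Int) :
    pvIdxB s = if 90 < s then 0 else if 80 < s then 1 else if 70 < s then 2
               else if 60 < s then 3 else if 50 < s then 4 else 5 := by
  unfold pvIdxB PySem.Int.floordiv
  rw [Int.fdiv_eq_ediv]
  split_ifs <;> omega

theorem pvPart_cons (i : Nat) (p : String × Int) (xs : List (String × Int)) :
    pvPart i (p :: xs) = (if pvIdxB p.2 = i then [p.1] else []) ++ pvPart i xs := by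
  by_cases h : pvIdxB p.2 = i <;> simp [pvPart, h]

theorem pvAfold (xs : List (String × Int)) (a b c d e f : List String) :
    xs.foldl pvStepA (a, b, c, d, e, f) =
      (a ++ pvPart 0 xs, b ++ pvPart 1 xs, c ++ pvPart 2 xs,
       d ++ pvPart 3 xs, e ++ pvPart 4 xs, f ++ pvPart 5 xs) := by
  induction xs generalizing a b c d e f with
  | nil => simp [pvPart]
  | cons p xs ih =>
    have hc := pvIdxB_cases p.2
    rw [List.foldl_cons]
    simp only [pvStepA]
    split_ifs at hc ⊢ <;>
      rw [ih] <;> simp [pvPart_cons, hc, List.append_assoc]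
theorem pvBfold (xs : List (String × Int)) (b0 b1 b2 b3 b4 b5 : List String) :
    xs.foldl pvStepB [b0, b1, b2, b3, b4, b5] =
      [b0 ++ pvPart 0 xs, b1 ++ pvPart 1 xs, b2 ++ pvPart 2 xs,
       b3 ++ pvPart 3 xs, b4 ++ pvPart 4 xs, b5 ++ pvPart 5 xs] := by
  induction xs generalizing b0 b1 b2 b3 b4 b5 with
  | nil => simp [pvPart]
  | cons p xs ih =>
    have hc := pvIdxB_cases p.2
    rw [List.foldl_cons]
    simp only [pvStepB]
    split_ifs at hc <;>
      simp only [hc, List.set, List.getElem?_cons, List.getD] <;>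
      norm_num <;> rw [ih] <;> simp [pvPart_cons, hc, List.append_assoc]

-- the lexicographic comparison sorted2 inserts with
def pvBlex (p q : String × Int) : Bool :=
  decide (p.1 < q.1) || (!decide (q.1 < p.1) && decide (p.2 < q.2))

theorem pvBlex_true {x y : String × Int} (h : pvBlex x y = true) : x.1 ≤ y.1 := by
  simp only [pvBlex, Bool.or_eq_true, Bool.and_eq_true, Bool.not_eq_true',
    decide_eq_true_eq, decide_eq_false_iff_not] at h
  rcases h with h | ⟨h, _⟩
  · exact le_of_lt h
  · exact not_lt.mp h

theorem pvBlex_false {x y : String × Int} (h : pvBlex x y = false) : y.1 ≤ x.1 := by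
  simp only [pvBlex, Bool.or_eq_false_iff, Bool.and_eq_false_iff, Bool.not_eq_false',
    decide_eq_false_iff_not, decide_eq_true_eq] at h
  exact not_lt.mp h.1

theorem pvInsertBy_pw (x : String × Int) (ys : List (String × Int))
    (h : ys.Pairwise (fun p q => p.1 ≤ q.1)) :
    (PySem.List.insertBy pvBlex x ys).Pairwise (fun p q => p.1 ≤ q.1) := by
  induction ys with
  | nil => simp [PySem.List.insertBy]
  | cons y ys ih =>
    rw [List.pairwise_cons] at h
    by_cases hb : pvBlex x y
    · simp only [PySem.List.insertBy, hb, if_true]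
      refine List.pairwise_cons.mpr ⟨?_, List.pairwise_cons.mpr h⟩
      intro z hz
      rcases List.mem_cons.mp hz with rfl | hz
      · exact pvBlex_true hb
      · exact le_trans (pvBlex_true hb) (h.1 z hz)
    · simp only [PySem.List.insertBy, hb, if_false, Bool.false_eq_true]
      refine List.pairwise_cons.mpr ⟨?_, ih h.2⟩
      intro z hz
      rcases (PySem.List.mem_insertBy pvBlex x z ys).mp hz with rfl | hz
      · exact pvBlex_false (Bool.eq_false_iff.mpr hb)
      · exact h.1 z hz

-- the items-sorted list is nondecreasing in the name component
theorem pvSorted2_pairwise_fst (xs : List (String × Int)) :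
    (PySem.List.sorted2 xs Prod.fst Prod.snd false).Pairwise (fun p q => p.1 ≤ q.1) := by
  have e : PySem.List.sorted2 xs Prod.fst Prod.snd false =
      List.foldl (fun acc x => PySem.List.insertBy pvBlex x acc) [] xs := rfl
  rw [e]
  have main : ∀ (ys : List (String × Int)) (acc : List (String × Int)),
      acc.Pairwise (fun p q => p.1 ≤ q.1) →
      (List.foldl (fun acc x => PySem.List.insertBy pvBlex x acc) acc ys).Pairwise
        (fun p q => p.1 ≤ q.1) := by
    intro ys
    induction ys with
    | nil => intro acc hacc; simpa using hacc
    | cons y ys ih => intro acc hacc; exact ih _ (pvInsertBy_pw y acc hacc)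
  exact main xs [] (by simp)

-- sorting each bucket of names = taking the bucket out of the globally sorted items
theorem pvBucket (P : (String × Int) → Bool) (xs : List (String × Int)) :
    PySem.List.sorted ((xs.filter P).map Prod.fst) (fun x => x) false =
      ((PySem.List.sorted2 xs Prod.fst Prod.snd false).filter P).map Prod.fst := by
  apply PySem.List.sorted_id_eq_of_perm_of_pairwise
  · exact ((PySem.List.sorted2_perm xs Prod.fst Prod.snd false).filter P).map Prod.fst
  · exact List.pairwise_map.mpr ((pvSorted2_pairwise_fst xs).filter P)

theorem pvPart_sorted (i : Nat) (xs : List (String × Int)) :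
    PySem.List.sorted (pvPart i xs) (fun x => x) false =
      pvPart i (PySem.List.sorted2 xs Prod.fst Prod.snd false) := by
  exact pvBucket (fun p => pvIdxB p.2 == i) xs

-- ===== VERDICT (by name: the statement is the Claim_ definition above) =====
theorem sorted_students_spec : Claim_equal_sorted_students := by
  intro xs _
  unfold Spec_sorted_students sorted_students sorted_students_alt
  rw [pvAfold, pvBfold]
  simp [List.zip, pvPart_sorted]
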